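-- pv_equiv track=rewrite | github.com/szigyi/sense-hat-matrix | src/sense_hat_matrix/LedMatrixUtil.py | __shift_array
-- ===== SOURCE A (Python) =====
-- def __shift_array(array, default):
--     size = len(array)
--     for i in range(0, size):
--         if i == size - 1:
--             temp = default
--         else:
--             temp = array[i+1]
--         array[i] = temp
--     return array
-- ===== SOURCE B (Python) =====
-- def __shift_array(array, default):
--     if array:
--         array[:] = array[1:] + [default]
--     return array
-- ===== Notes on version B (the rewrite author's own statement) =====
-- stated objective: idiomatic
-- what changed: Replaces the element-by-element index loop (each slot overwritten with its right neighbour, last with the default) by a single slice-and-concat in-place reconstruction array[:] = array[1:] + [default], guarded for the empty list.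
import Mathlib
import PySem

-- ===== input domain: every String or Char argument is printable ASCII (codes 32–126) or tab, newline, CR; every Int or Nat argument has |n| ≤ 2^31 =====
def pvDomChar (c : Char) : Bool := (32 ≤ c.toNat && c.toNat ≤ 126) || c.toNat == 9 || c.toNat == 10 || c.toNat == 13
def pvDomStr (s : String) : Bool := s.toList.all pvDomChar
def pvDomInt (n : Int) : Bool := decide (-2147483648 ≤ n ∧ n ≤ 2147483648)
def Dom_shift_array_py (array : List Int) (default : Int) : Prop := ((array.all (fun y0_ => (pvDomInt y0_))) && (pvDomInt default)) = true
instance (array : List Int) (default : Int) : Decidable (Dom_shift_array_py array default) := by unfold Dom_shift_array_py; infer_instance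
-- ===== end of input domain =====

-- B replaces A's index loop by a guarded slice-and-concat rebuild; both mutate the
-- argument list in place in Python and the equivalence proved here is about the
-- return value (the in-place contents coincide with it in both programs).

-- ===== PORT A =====
-- literal port of the index loop: for i in range(0, size): array[i] = (default if i == size-1 else array[i+1])
def shift_array_py (array : List Int) (default : Int) : List Int :=
  let size : Int := PySem.List.len array
  (PySem.List.pyRange 0 size 1).foldl
    (fun acc i =>
      let temp : Int := if i == size - 1 then default else PySem.List.pyGetD acc (i + 1) 0
      PySem.List.pySetD acc i temp) array

-- ===== PORT B =====
-- literal port of: if array: array[:] = array[1:] + [default]; return array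
def shift_array_py_alt (array : List Int) (default : Int) : List Int :=
  if array = [] then array else PySem.List.slice array (some 1) none ++ [default]

-- ===== PRECONDITION & SPEC =====
def Spec_shift_array_py (array : List Int) (default : Int) (out : List Int) : Prop := out = shift_array_py_alt array default
instance (array : List Int) (default : Int) (out : List Int) : Decidable (Spec_shift_array_py array default out) := by unfold Spec_shift_array_py; infer_instance

-- ===== CLAIM (what is proved, stated in full; the proofs are below) =====
def Claim_equal_shift_array_py : Prop := ∀ (array : List Int) (default : Int), Dom_shift_array_py array default → Spec_shift_array_py array default (shift_array_py array default)

-- ===== LEMMAS AND PROOFS =====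

-- Loop invariant: with the first `front.length` slots already shifted and the suffix
-- `xs` untouched, running A's loop over the remaining indices yields front ++ xs.tail ++ [d].
theorem shift_loop_invariant (d n : Int) (xs front : List Int)
    (hn : n = (front.length : Int) + xs.length) (hxs : xs ≠ []) :
    (PySem.List.pyRange (front.length : Int) n 1).foldl
      (fun acc i =>
        let temp : Int := if i == n - 1 then d else PySem.List.pyGetD acc (i + 1) 0
        PySem.List.pySetD acc i temp) (front ++ xs)
      = front ++ xs.tail ++ [d] := by
  induction xs generalizing front with
  | nil => exact absurd rfl hxs
  | cons x t ih =>
    cases t with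
    | nil =>
      have hrange : PySem.List.pyRange (front.length : Int) n 1 = [(front.length : Int)] := by
        subst hn; simp [PySem.List.pyRange_one_singleton]
      rw [hrange]
      simp only [List.foldl_cons, List.foldl_nil]
      have hi : ((front.length : Int) == n - 1) = true := by
        subst hn; simp
      rw [hi]
      simp [PySem.List.pySetD_natCast, List.set_append_right]
    | cons y t' =>
      have hlt : (front.length : Int) < n := by
        subst hn; simp only [List.length_cons]; push_cast; omega
      rw [PySem.List.pyRange_one_cons hlt]
      simp only [List.foldl_cons]
      have hne : ((front.length : Int) == n - 1) = false := by
        simp only [beq_eq_false_iff_ne, ne_eq]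
        subst hn; simp only [List.length_cons]; push_cast; omega
      rw [hne]
      simp only [if_false, Bool.false_eq_true]
      have hcast : ((front.length : Int) + 1) = ((front.length + 1 : Nat) : Int) := by
        push_cast; ring
      have hget : PySem.List.pyGetD (front ++ x :: y :: t') ((front.length : Int) + 1) 0 = y := by
        rw [hcast, PySem.List.pyGetD_natCast]
        rw [List.getD_append_right _ _ _ _ (by omega)]
        simp
      rw [hget]
      have hset : PySem.List.pySetD (front ++ x :: y :: t') ((front.length : Int)) y
          = (front ++ [y]) ++ (y :: t') := by
        rw [PySem.List.pySetD_natCast, List.set_append_right _ _ (by omega)]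
        simp
      rw [hset]
      have hlen : ((front ++ [y]).length : Int) = (front.length : Int) + 1 := by
        simp
      have hrec := ih (front := front ++ [y])
        (by rw [hlen]; subst hn; simp only [List.length_cons]; push_cast; omega) (by simp)
      rw [hlen] at hrec
      rw [hrec]
      simp

-- ===== VERDICT (by name: the statement is the Claim_ definition above) =====
theorem shift_array_py_spec : Claim_equal_shift_array_py := by
  intro array d _
  unfold Spec_shift_array_py shift_array_py shift_array_py_alt
  by_cases h : array = []
  · subst h; simp [PySem.List.len]
  · simp only [if_neg h]
    rw [PySem.List.slice_from_one]
    have hinv := shift_loop_invariant d (PySem.List.len array) array [] (by simp [PySem.List.len]) h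
    simpa using hinv
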